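-- pv_equiv track=rewrite | github.com/Aremak-Bilisim/Internal-Tools | aremak-operasyon/backend/app/services/parasut.py | build_invoice_map
-- ===== SOURCE A (Python) =====
-- def build_invoice_map(invoices: list) -> dict:
--     """Map normalized contact name → most recent invoice."""
--     result: dict = {}
--     for inv in invoices:
--         key = inv["contact_name_normalized"]
--         if not key:
--             continue
--         if key not in result or inv["issue_date"] > result[key]["issue_date"]:
--             result[key] = inv
--     return result
-- ===== SOURCE B (Python) =====
-- def build_invoice_map(invoices: list) -> dict:
--     """Map normalized contact name -> most recent invoice.
--
--     Group invoices by normalized contact name (skipping falsy keys), then pick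
--     the most recent invoice of each group with max() (first maximum wins ties,
--     matching the strict '>' replacement rule); a missing issue_date counts as
--     oldest ("")."""
--     groups: dict = {}
--     for inv in invoices:
--         key = inv["contact_name_normalized"]
--         if key:
--             groups.setdefault(key, []).append(inv)
--     return {k: max(lst, key=lambda i: i.get("issue_date", "")) for k, lst in groups.items()}
-- ===== Notes on version B (the rewrite author's own statement) =====
-- stated objective: alternative
-- what changed: B groups invoices by normalized contact name into lists (setdefault+append) and then picks each group's most recent invoice with max(key=issue_date, missing date = oldest) in a dict comprehension, instead of A's single-pass running strict-greater replacement.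
import Mathlib
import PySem

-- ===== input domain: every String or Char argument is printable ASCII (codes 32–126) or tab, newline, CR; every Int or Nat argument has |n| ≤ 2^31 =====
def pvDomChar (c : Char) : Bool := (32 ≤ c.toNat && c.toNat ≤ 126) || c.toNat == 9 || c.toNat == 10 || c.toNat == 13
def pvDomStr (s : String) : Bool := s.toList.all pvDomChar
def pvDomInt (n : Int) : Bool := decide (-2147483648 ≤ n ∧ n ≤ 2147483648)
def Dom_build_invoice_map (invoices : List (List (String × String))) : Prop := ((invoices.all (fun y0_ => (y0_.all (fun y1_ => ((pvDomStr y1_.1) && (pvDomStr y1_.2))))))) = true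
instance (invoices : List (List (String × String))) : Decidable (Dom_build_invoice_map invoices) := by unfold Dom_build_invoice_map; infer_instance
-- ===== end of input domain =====

-- B groups invoices by key and then takes max(group, key=issue_date) per group, instead of
-- A's running strict-greater replacement; same values, same order (objective: alternative).

-- inv[k] for a Python dict inv; the .getD "" default is never reached inside Pre_
def pyLookup (inv : List (String × String)) (k : String) : String :=
  ((PySem.Dict.mk inv).get? k).getD ""

-- ===== PORT A =====
def build_invoice_map (invoices : List (List (String × String))) : List (String × List (String × String)) :=
  (invoices.foldl
    (fun (result : PySem.Dict String (List (String × String))) inv =>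
      let key := pyLookup inv "contact_name_normalized"
      if key = "" then result
      else
        match result.get? key with
        | none => result.insert key inv
        | some cur =>
          if pyLookup cur "issue_date" < pyLookup inv "issue_date"
          then result.insert key inv else result)
    PySem.Dict.empty).items

-- ===== PORT B =====
def build_invoice_map_alt (invoices : List (List (String × String))) : List (String × List (String × String)) :=
  (invoices.foldl
    (fun (groups : PySem.Dict String (List (List (String × String)))) inv =>
      let key := pyLookup inv "contact_name_normalized"
      if key = "" then groups
      else groups.modify key [] (· ++ [inv]))
    PySem.Dict.empty).items.map
    (fun p => (p.1, (PySem.List.max? p.2 (fun i => pyLookup i "issue_date")).getD []))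

-- ===== PRECONDITION & SPEC =====
-- Pre_ is exactly where Python A returns: every invoice has "contact_name_normalized", and an
-- invoice whose truthy key occurs in ≥ 2 invoices also has "issue_date" (short-circuit: A only
-- reads issue_date when a key repeats).
def Pre_build_invoice_map (invoices : List (List (String × String))) : Prop :=
  ∀ inv ∈ invoices,
    ((PySem.Dict.mk inv).get? "contact_name_normalized").isSome ∧
    ((PySem.Dict.mk inv).get? "contact_name_normalized" ≠ some "" →
      2 ≤ invoices.countP (fun j => (PySem.Dict.mk j).get? "contact_name_normalized"
            == (PySem.Dict.mk inv).get? "contact_name_normalized") →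
      ((PySem.Dict.mk inv).get? "issue_date").isSome)
instance (invoices : List (List (String × String))) : Decidable (Pre_build_invoice_map invoices) := by
  unfold Pre_build_invoice_map; infer_instance

def pvWitness_build_invoice_map : (List (List (String × String))) :=
  [[("contact_name_normalized", "acme"), ("issue_date", "2024-01-05")],
   [("contact_name_normalized", "acme"), ("issue_date", "2024-01-02")],
   [("contact_name_normalized", "")]]


def Spec_build_invoice_map (invoices : List (List (String × String))) (out : List (String × List (String × String))) : Prop := out = build_invoice_map_alt invoices
instance (invoices : List (List (String × String))) (out : List (String × List (String × String))) : Decidable (Spec_build_invoice_map invoices out) := by unfold Spec_build_invoice_map; infer_instance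

-- ===== CLAIM (what is proved, stated in full; the proofs are below) =====
def Claim_equal_build_invoice_map : Prop := ∀ (invoices : List (List (String × String))), Dom_build_invoice_map invoices → Pre_build_invoice_map invoices → Spec_build_invoice_map invoices (build_invoice_map invoices)

-- ===== LEMMAS AND PROOFS =====

-- value map relating B's group lists to A's stored invoices: first maximum by issue_date
def pvF (p : String × List (List (String × String))) : String × List (String × String) :=
  (p.1, (PySem.List.max? p.2 (fun i => pyLookup i "issue_date")).getD [])

lemma pv_find_map {β γ : Type} (l : List (String × β)) (f : String × β → String × γ)
    (hf : ∀ p, (f p).1 = p.1) (k : String) :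
    (l.map f).find? (fun p => p.1 == k) = (l.find? (fun p => p.1 == k)).map f := by
  induction l with
  | nil => rfl
  | cons a t ih =>
    by_cases h : a.1 = k
    · simp [hf, h]
    · simp [hf, h, ih]

lemma pv_uniq {β : Type} (l : List (String × β)) (k : String) (v : β)
    (hnd : (l.map Prod.fst).Nodup) (hm : (k, v) ∈ l) :
    ∀ p ∈ l, p.1 = k → p = (k, v) := by
  induction l with
  | nil => simp at hm
  | cons a t ih =>
    simp only [List.map_cons, List.nodup_cons] at hnd
    intro p hp hpk
    rcases List.mem_cons.mp hm with hm | hm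
    · rcases List.mem_cons.mp hp with hp | hp
      · rw [hp, hm]
      · have h1 : p.1 ∈ t.map Prod.fst := List.mem_map_of_mem hp
        rw [hpk] at h1
        have h2 : a.1 = k := by rw [← hm]
        exact absurd (h2 ▸ h1) hnd.1
    · rcases List.mem_cons.mp hp with hp | hp
      · have h1 : (k : String) ∈ t.map Prod.fst := by
          have := List.mem_map_of_mem (f := Prod.fst) hm; simpa using this
        rw [hp] at hpk
        exact absurd (hpk ▸ h1) hnd.1
      · exact ih hnd.2 hm p hp hpk

lemma pv_mb_append (lst : List (List (String × String))) (inv : List (String × String))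
    (hne : lst ≠ []) :
    (PySem.List.max? (lst ++ [inv]) (fun i => pyLookup i "issue_date")).getD [] =
    (if pyLookup ((PySem.List.max? lst (fun i => pyLookup i "issue_date")).getD [])
          "issue_date" < pyLookup inv "issue_date"
     then inv
     else (PySem.List.max? lst (fun i => pyLookup i "issue_date")).getD []) := by
  rcases hm : PySem.List.max? lst (fun i => pyLookup i "issue_date") with _ | m
  · exact absurd ((PySem.List.max?_eq_none_iff _ _).mp hm) hne
  · simp only [PySem.List.max?, List.foldl_append] at hm ⊢
    rw [hm]
    by_cases h : pyLookup m "issue_date" < pyLookup inv "issue_date"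
    · simp only [List.foldl_cons, List.foldl_nil, if_pos h, Option.getD_some]
    · simp only [List.foldl_cons, List.foldl_nil, if_neg h, Option.getD_some]

lemma pv_fst_pvF (p : String × List (List (String × String))) : (pvF p).1 = p.1 := rfl

lemma pv_step (g : PySem.Dict String (List (List (String × String))))
    (r : PySem.Dict String (List (String × String))) (inv : List (String × String))
    (h1 : r.items = g.items.map pvF)
    (h2 : (g.items.map Prod.fst).Nodup)
    (h3 : ∀ p ∈ g.items, p.2 ≠ []) :
    ((fun (result : PySem.Dict String (List (String × String))) inv =>
      let key := pyLookup inv "contact_name_normalized"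
      if key = "" then result
      else
        match result.get? key with
        | none => result.insert key inv
        | some cur =>
          if pyLookup cur "issue_date" < pyLookup inv "issue_date"
          then result.insert key inv else result) r inv).items =
    ((fun (groups : PySem.Dict String (List (List (String × String)))) inv =>
      let key := pyLookup inv "contact_name_normalized"
      if key = "" then groups
      else groups.modify key [] (· ++ [inv])) g inv).items.map pvF ∧
    (((fun (groups : PySem.Dict String (List (List (String × String)))) inv =>
      let key := pyLookup inv "contact_name_normalized"
      if key = "" then groups
      else groups.modify key [] (· ++ [inv])) g inv).items.map Prod.fst).Nodup ∧
    (∀ p ∈ ((fun (groups : PySem.Dict String (List (List (String × String)))) inv =>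
      let key := pyLookup inv "contact_name_normalized"
      if key = "" then groups
      else groups.modify key [] (· ++ [inv])) g inv).items, p.2 ≠ []) := by
  dsimp only
  set key := pyLookup inv "contact_name_normalized" with hkey
  by_cases hk : key = ""
  · simp only [if_pos hk]
    exact ⟨h1, h2, h3⟩
  simp only [if_neg hk]
  have hget : r.get? key = ((g.items.find? (fun p => p.1 == key)).map pvF).map (·.2) := by
    simp only [PySem.Dict.get?, h1, pv_find_map g.items pvF pv_fst_pvF key]
  have hanyr : r.items.any (fun p => p.1 == key) = g.items.any (fun p => p.1 == key) := by
    rw [h1, List.any_map]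
    rfl
  rcases hfind : g.items.find? (fun p => p.1 == key) with _ | q
  · -- key not present in either dict: both append
    have hnone : r.get? key = none := by rw [hget, hfind]; rfl
    have hnotmem : ∀ p ∈ g.items, ¬ (p.1 == key) = true := List.find?_eq_none.mp hfind
    have hcg : g.items.any (fun p => p.1 == key) = false := by
      simp only [List.any_eq_false]; exact hnotmem
    have hcr : r.items.any (fun p => p.1 == key) = false := by rw [hanyr]; exact hcg
    rw [hnone]
    simp only [PySem.Dict.modify, PySem.Dict.insert, PySem.Dict.contains, PySem.Dict.getD,
      PySem.Dict.get?, hfind, hcg, hcr, Bool.false_eq_true, if_false, Option.map_none,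
      Option.getD_none, List.nil_append]
    refine ⟨?_, ?_, ?_⟩
    · simp only [List.map_append, List.map_cons, List.map_nil, h1]
      rfl
    · simp only [List.map_append, List.map_cons, List.map_nil, List.nodup_append]
      refine ⟨h2, List.nodup_singleton _, ?_⟩
      intro a ha b hb
      rw [List.mem_singleton] at hb
      intro heq
      obtain ⟨p, hp, hpa⟩ := List.mem_map.mp ha
      exact hnotmem p hp (beq_iff_eq.mpr (by rw [hpa, heq, hb]))
    · intro p hp
      rcases List.mem_append.mp hp with hp | hp
      · exact h3 p hp
      · simp only [List.mem_singleton] at hp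
        rw [hp]
        simp
  · -- key present: A updates on strictly-greater date; B appends to the group
    have hq1 : q.1 = key := by
      have h := List.find?_some hfind
      exact beq_iff_eq.mp h
    have hqmem : q ∈ g.items := List.mem_of_find?_eq_some hfind
    have hqmem' : (key, q.2) ∈ g.items := by rw [← hq1]; exact hqmem
    have hlne : q.2 ≠ [] := h3 q hqmem
    have hsome : r.get? key = some (pvF q).2 := by rw [hget, hfind]; rfl
    have hcg : g.items.any (fun p => p.1 == key) = true :=
      List.any_eq_true.mpr ⟨q, hqmem, beq_iff_eq.mpr hq1⟩
    have hcr : r.items.any (fun p => p.1 == key) = true := by rw [hanyr]; exact hcg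
    have hgetg : PySem.Dict.get? g key = some q.2 := by
      simp only [PySem.Dict.get?, hfind, Option.map_some]
    have hBitems : (g.modify key [] (· ++ [inv])).items =
        g.items.map (fun p => if p.1 == key then (key, q.2 ++ [inv]) else p) := by
      simp only [PySem.Dict.modify, PySem.Dict.insert, PySem.Dict.contains, PySem.Dict.getD,
        hgetg, hcg, if_true, Option.getD_some]
    have hfstB : ((g.modify key [] (· ++ [inv])).items.map Prod.fst) = g.items.map Prod.fst := by
      rw [hBitems, List.map_map]
      refine List.map_congr_left ?_
      intro p _
      simp only [Function.comp_apply]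
      by_cases hpk : p.1 = key
      · simp [hpk]
      · simp [hpk]
    have hcur : (pvF q).2 = (PySem.List.max? q.2 (fun i => pyLookup i "issue_date")).getD [] := rfl
    have hmb := pv_mb_append q.2 inv hlne
    rw [hsome]
    refine ⟨?_, ?_, ?_⟩
    · -- the items lists agree pointwise
      rw [hBitems, List.map_map]
      by_cases hlt : pyLookup (pvF q).2 "issue_date" < pyLookup inv "issue_date"
      · simp only [if_pos hlt, PySem.Dict.insert, PySem.Dict.contains, hcr, if_true]
        rw [h1, List.map_map]
        refine List.map_congr_left ?_
        intro p hp
        simp only [Function.comp_apply]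
        by_cases hpk : p.1 = key
        · have hpq : p = (key, q.2) := pv_uniq g.items key q.2 h2 hqmem' p hp hpk
          rw [hpq]
          simp only [pvF, beq_self_eq_true, if_true]
          rw [hmb, if_pos (by rw [hcur] at hlt; exact hlt)]
        · have hne : (p.1 == key) = false := beq_eq_false_iff_ne.mpr hpk
          simp only [pvF, hne, Bool.false_eq_true, if_false]
      · simp only [if_neg hlt, h1]
        refine List.map_congr_left ?_
        intro p hp
        simp only [Function.comp_apply]
        by_cases hpk : p.1 = key
        · have hpq : p = (key, q.2) := pv_uniq g.items key q.2 h2 hqmem' p hp hpk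
          rw [hpq]
          simp only [pvF, beq_self_eq_true, if_true]
          rw [hmb, if_neg (by rw [hcur] at hlt; exact hlt)]
        · have hne : (p.1 == key) = false := beq_eq_false_iff_ne.mpr hpk
          simp only [pvF, hne, Bool.false_eq_true, if_false]
    · rw [hfstB]; exact h2
    · intro p hp
      rw [hBitems] at hp
      obtain ⟨p0, hp0, hpp⟩ := List.mem_map.mp hp
      by_cases hpk : p0.1 = key
      · rw [← hpp]
        simp only [beq_iff_eq, if_pos hpk]
        simp
      · rw [← hpp]
        simp only [beq_iff_eq, if_neg hpk]
        exact h3 p0 hp0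

lemma pv_main (invs : List (List (String × String))) :
    ∀ (g : PySem.Dict String (List (List (String × String))))
      (r : PySem.Dict String (List (String × String))),
    r.items = g.items.map pvF → (g.items.map Prod.fst).Nodup → (∀ p ∈ g.items, p.2 ≠ []) →
    (invs.foldl
      (fun (result : PySem.Dict String (List (String × String))) inv =>
        let key := pyLookup inv "contact_name_normalized"
        if key = "" then result
        else
          match result.get? key with
          | none => result.insert key inv
          | some cur =>
            if pyLookup cur "issue_date" < pyLookup inv "issue_date"
            then result.insert key inv else result) r).items =
    (invs.foldl
      (fun (groups : PySem.Dict String (List (List (String × String)))) inv =>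
        let key := pyLookup inv "contact_name_normalized"
        if key = "" then groups
        else groups.modify key [] (· ++ [inv])) g).items.map pvF := by
  induction invs with
  | nil => intro g r h1 _ _; exact h1
  | cons inv t ih =>
    intro g r h1 h2 h3
    simp only [List.foldl_cons]
    obtain ⟨s1, s2, s3⟩ := pv_step g r inv h1 h2 h3
    exact ih _ _ s1 s2 s3

-- ===== VERDICT (by name: the statement is the Claim_ definition above) =====
theorem build_invoice_map_spec : Claim_equal_build_invoice_map := by
  intro invoices _ _
  unfold Spec_build_invoice_map build_invoice_map build_invoice_map_alt
  exact pv_main invoices PySem.Dict.empty PySem.Dict.empty rfl (by simp [PySem.Dict.empty]) (by simp [PySem.Dict.empty])
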